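-- pv_equiv track=rewrite | github.com/ridl-uta/MPR-System-Beta | dvfs/controller.py | _normalize_cores
-- ===== SOURCE A (Python) =====
-- from typing import Any, Dict, Iterable, List
--
-- def _normalize_cores(core_numbers: Iterable[int]) -> List[int]:
--     normalized: list[int] = []
--     seen: set[int] = set()
--     for core in core_numbers:
--         core_i = int(core)
--         if core_i < 0:
--             raise ValueError(f"core numbers must be >= 0, got {core_i}")
--         if core_i in seen:
--             continue
--         seen.add(core_i)
--         normalized.append(core_i)
--     return sorted(normalized)
-- ===== SOURCE B (Python) =====
-- from typing import Iterable, List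
--
-- def _normalize_cores(core_numbers: Iterable[int]) -> List[int]:
--     vals: List[int] = []
--     for core in core_numbers:
--         core_i = int(core)
--         if core_i < 0:
--             raise ValueError(f"core numbers must be >= 0, got {core_i}")
--         vals.append(core_i)
--     vals.sort()
--     result: List[int] = []
--     for v in vals:
--         if not result or result[-1] != v:
--             result.append(v)
--     return result
-- ===== Notes on version B (the rewrite author's own statement) =====
-- stated objective: alternative
-- what changed: B keeps duplicates during the in-order validation pass, sorts the full list, and deduplicates by adjacency in one final scan, instead of maintaining a hash set of seen cores during the input loop.
import Mathlib
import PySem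

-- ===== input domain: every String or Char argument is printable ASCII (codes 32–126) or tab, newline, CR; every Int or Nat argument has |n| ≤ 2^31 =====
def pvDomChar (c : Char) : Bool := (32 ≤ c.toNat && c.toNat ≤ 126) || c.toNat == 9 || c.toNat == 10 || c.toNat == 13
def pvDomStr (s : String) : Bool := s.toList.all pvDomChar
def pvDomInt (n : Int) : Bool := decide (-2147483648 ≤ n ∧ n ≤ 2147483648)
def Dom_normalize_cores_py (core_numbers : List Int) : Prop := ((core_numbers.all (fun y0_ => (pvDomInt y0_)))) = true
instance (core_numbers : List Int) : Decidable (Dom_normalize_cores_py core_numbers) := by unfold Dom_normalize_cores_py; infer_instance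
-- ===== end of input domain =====

-- B validates in order but keeps duplicates, sorts, then dedups by adjacency in one final scan
-- (no hash set during the input loop); an alternative decomposition of the same task, not claimed faster.
-- On a negative input both A and B raise the same ValueError; Pre_ excludes exactly those inputs.

-- ===== PORT A =====
-- the 'core_i < 0: raise ValueError' branch is a raise; Pre_ excludes those inputs, so the port omits it
def normalize_cores_py (core_numbers : List Int) : List Int :=
  let st := core_numbers.foldl
    (fun (acc : List Int × PySem.Set Int) core =>
      let core_i := core   -- int(core) on an Int is the identity
      if PySem.Set.contains acc.2 core_i then acc
      else (acc.1 ++ [core_i], PySem.Set.add acc.2 core_i))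
    ([], PySem.Set.empty)
  PySem.List.sorted st.1 (fun x => x) false

-- ===== PORT B =====
-- one step of B's final scan: 'if not result or result[-1] != v: result.append(v)'
def pvAppendUnique (res : List Int) (v : Int) : List Int :=
  if res = [] ∨ PySem.List.pyGet? res (-1) ≠ some v then res ++ [v] else res

def normalize_cores_py_alt (core_numbers : List Int) : List Int :=
  -- the validation loop appends every int(core) (identity on Int; the raise is excluded by Pre_)
  let vals := core_numbers.map (fun core => core)
  let sortedVals := PySem.List.sorted vals (fun x => x) false
  sortedVals.foldl pvAppendUnique []

-- ===== PRECONDITION & SPEC =====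
-- Pre_: both Pythons raise ValueError on any negative element; nothing else is excluded.
def Pre_normalize_cores_py (core_numbers : List Int) : Prop := ∀ c ∈ core_numbers, 0 ≤ c
instance (core_numbers : List Int) : Decidable (Pre_normalize_cores_py core_numbers) := by
  unfold Pre_normalize_cores_py; infer_instance

def pvWitness_normalize_cores_py : List Int := [3, 0, 2, 3, 1, 2]

def Spec_normalize_cores_py (core_numbers : List Int) (out : List Int) : Prop := out = normalize_cores_py_alt core_numbers
instance (core_numbers : List Int) (out : List Int) : Decidable (Spec_normalize_cores_py core_numbers out) := by unfold Spec_normalize_cores_py; infer_instance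

-- ===== CLAIM (what is proved, stated in full; the proofs are below) =====
def Claim_equal_normalize_cores_py : Prop := ∀ (core_numbers : List Int), Dom_normalize_cores_py core_numbers → Pre_normalize_cores_py core_numbers → Spec_normalize_cores_py core_numbers (normalize_cores_py core_numbers)

-- ===== LEMMAS AND PROOFS =====

-- B's adjacency step, rewritten through getLast?
lemma pvAppendUnique_eq (res : List Int) (v : Int) :
    pvAppendUnique res v = if res.getLast? = some v then res else res ++ [v] := by
  unfold pvAppendUnique
  rcases eq_or_ne res [] with h | h
  · subst h; simp
  · have hget : PySem.List.pyGet? res (-1) = res.getLast? := by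
      simp only [PySem.List.pyGet?, PySem.List.pyIdx?, Int.reduceNeg, Int.neg_nonneg,
        Int.reduceLE, ↓reduceIte, neg_le_neg_iff, Nat.one_le_cast, neg_neg, Int.toNat_one]
      rw [if_pos (Nat.one_le_iff_ne_zero.mpr (by simpa using h))]
      simp [List.getLast?_eq_getElem?]
    rw [hget]
    by_cases hv : res.getLast? = some v <;> simp [h, hv]

-- in a ≤-sorted list every element is bounded by the last one
lemma le_getLast_of_pairwise (l : List Int) (a : Int)
    (hl : l.Pairwise (· ≤ ·)) (ha : a ∈ l) :
    ∃ m, l.getLast? = some m ∧ a ≤ m := by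
  induction l generalizing a with
  | nil => cases ha
  | cons x t ih =>
    rcases List.pairwise_cons.mp hl with ⟨hx, ht⟩
    cases t with
    | nil =>
      simp only [List.mem_singleton] at ha
      exact ⟨x, by simp, le_of_eq ha⟩
    | cons y s =>
      rcases List.mem_cons.mp ha with rfl | ha
      · rcases ih y ht (by simp) with ⟨m, hm, hym⟩
        exact ⟨m, by simpa using hm, le_trans (hx y (by simp)) hym⟩
      · rcases ih a ht ha with ⟨m, hm, hle⟩
        exact ⟨m, by simpa using hm, hle⟩

-- A's loop keeps 'normalized' and 'seen' equal as lists, so its result list is xs.foldl Set.add s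
lemma a_fold_eq (xs : List Int) (s : PySem.Set Int) :
    xs.foldl
      (fun (acc : List Int × PySem.Set Int) core =>
        if PySem.Set.contains acc.2 core then acc
        else (acc.1 ++ [core], PySem.Set.add acc.2 core))
      (s, s)
    = (xs.foldl PySem.Set.add s, xs.foldl PySem.Set.add s) := by
  induction xs generalizing s with
  | nil => rfl
  | cons x t ih =>
    by_cases h : x ∈ s
    · have hadd : PySem.Set.add s x = s := by simp [PySem.Set.add, h]
      simpa [h, hadd] using ih s
    · have hadd : PySem.Set.add s x = s ++ [x] := by simp [PySem.Set.add, h]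
      simpa [h, hadd] using ih (s ++ [x])

-- invariant of B's final scan over a ≤-sorted list
lemma b_fold_inv (l : List Int) :
    ∀ acc : List Int, l.Pairwise (· ≤ ·) → acc.Pairwise (· < ·) →
    (∀ a ∈ acc, ∀ b ∈ l, a ≤ b) →
    (l.foldl pvAppendUnique acc).Pairwise (· < ·) ∧
    (∀ x, x ∈ l.foldl pvAppendUnique acc ↔ x ∈ acc ∨ x ∈ l) := by
  induction l with
  | nil => intro acc _ hacc _; exact ⟨hacc, fun x => by simp⟩
  | cons v t ih =>
    intro acc hl hacc hlink
    rcases List.pairwise_cons.mp hl with ⟨hv, ht⟩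
    simp only [List.foldl_cons, pvAppendUnique_eq]
    by_cases h : acc.getLast? = some v
    · have hvmem : v ∈ acc := List.mem_of_getLast? h
      rw [if_pos h]
      obtain ⟨h1, h2⟩ := ih acc ht hacc
        (fun a ha b hb => hlink a ha b (List.mem_cons_of_mem _ hb))
      refine ⟨h1, fun x => ?_⟩
      rw [h2 x]
      simp only [List.mem_cons]
      constructor
      · rintro (hx | hx)
        · exact Or.inl hx
        · exact Or.inr (Or.inr hx)
      · rintro (hx | rfl | hx)
        exacts [Or.inl hx, Or.inl hvmem, Or.inr hx]
    · rw [if_neg h]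
      have hlt : ∀ a ∈ acc, a < v := by
        intro a ha
        have hle : a ≤ v := hlink a ha v List.mem_cons_self
        rcases lt_or_eq_of_le hle with hlt | heq
        · exact hlt
        · exfalso
          rcases le_getLast_of_pairwise acc a (hacc.imp le_of_lt) ha with ⟨m, hm, ham⟩
          have hmv : m ≤ v := hlink m (List.mem_of_getLast? hm) v List.mem_cons_self
          have hvm : v ≤ m := heq ▸ ham
          exact h (by rw [hm, le_antisymm hmv hvm])
      have hacc' : (acc ++ [v]).Pairwise (· < ·) := by
        rw [List.pairwise_append]
        exact ⟨hacc, List.pairwise_singleton _ _, by simpa using hlt⟩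
      have hlink' : ∀ a ∈ acc ++ [v], ∀ b ∈ t, a ≤ b := by
        intro a ha b hb
        rcases List.mem_append.mp ha with ha | ha
        · exact hlink a ha b (List.mem_cons_of_mem _ hb)
        · simp only [List.mem_singleton] at ha
          exact ha ▸ hv b hb
      obtain ⟨h1, h2⟩ := ih (acc ++ [v]) ht hacc' hlink'
      refine ⟨h1, fun x => ?_⟩
      rw [h2 x]
      simp [or_assoc]

-- ===== VERDICT (by name: the statement is the Claim_ definition above) =====
theorem normalize_cores_py_spec : Claim_equal_normalize_cores_py := by
  intro xs _ _
  unfold Spec_normalize_cores_py normalize_cores_py normalize_cores_py_alt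
  simp only [List.map_id_fun', id_eq]
  rw [show (([] : List Int), (PySem.Set.empty : PySem.Set Int)) =
        ((PySem.Set.empty : PySem.Set Int), (PySem.Set.empty : PySem.Set Int)) from rfl,
      a_fold_eq xs PySem.Set.empty]
  obtain ⟨hpw, hmem⟩ := b_fold_inv (PySem.List.sorted xs (fun x => x) false) []
    (PySem.List.sorted_pairwise xs (fun x => x)) (List.Pairwise.nil) (by simp)
  have hperm : (List.foldl pvAppendUnique [] (PySem.List.sorted xs (fun x => x) false)).Perm
      (PySem.Set.ofList xs) := by
    rw [List.perm_ext_iff_of_nodup (hpw.imp ne_of_lt) (PySem.Set.nodup_ofList xs)]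
    intro x
    rw [hmem x]
    simp [PySem.Set.mem_ofList, PySem.List.mem_sorted]
  have := PySem.List.sorted_eq_of_perm_of_pairwise_lt (PySem.Set.ofList xs)
    (List.foldl pvAppendUnique [] (PySem.List.sorted xs (fun x => x) false))
    (fun x => x) hperm (by simpa using hpw)
  simpa [PySem.Set.ofList_eq_foldl, PySem.Set.empty] using this
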